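-- pv_equiv track=rewrite | github.com/shadowbrok3r/Jarvis | kimodo-motion-service.py | _slugify_animation_stem
-- ===== SOURCE A (Python) =====
-- def _slugify_animation_stem(name: str) -> str:
--     """Match Rust / Node: [^a-z0-9_-] → underscore, then lowercase (ASCII alnum)."""
--     out: list[str] = []
--     for c in name.strip():
--         if c.isascii() and (c.isalnum() or c in "-_"):
--             out.append(c.lower())
--         else:
--             out.append("_")
--     s = "".join(out).strip("_")
--     return s or "unnamed"
-- ===== SOURCE B (Python) =====
-- # B: one regex substitution (explicit ASCII class, filter first, lowercase the
-- # whole masked string afterward) instead of the per-character branch loop.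
-- import re
--
-- _NON_SLUG = re.compile(r'[^A-Za-z0-9_-]')
--
-- def _slugify_animation_stem(name: str) -> str:
--     return _NON_SLUG.sub('_', name.strip()).lower().strip('_') or 'unnamed'
-- ===== Notes on version B (the rewrite author's own statement) =====
-- stated objective: idiomatic
-- what changed: A's fused per-character loop (branch, lowercase each kept char, append) is replaced by staged whole-string passes: one regex substitution with an explicit ASCII class masks disallowed characters to underscore, then the whole masked string is lowercased, then underscore-stripped.
import Mathlib
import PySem

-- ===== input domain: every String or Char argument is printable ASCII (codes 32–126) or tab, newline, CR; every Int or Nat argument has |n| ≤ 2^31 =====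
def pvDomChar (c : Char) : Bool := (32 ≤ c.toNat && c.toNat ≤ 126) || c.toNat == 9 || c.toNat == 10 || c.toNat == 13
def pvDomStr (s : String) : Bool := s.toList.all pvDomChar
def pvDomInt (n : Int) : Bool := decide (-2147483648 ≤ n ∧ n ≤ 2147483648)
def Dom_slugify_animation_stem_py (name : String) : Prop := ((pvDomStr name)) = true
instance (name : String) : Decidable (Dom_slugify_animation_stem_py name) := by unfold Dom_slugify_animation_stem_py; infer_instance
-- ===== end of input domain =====

-- B replaces A's fused per-character loop by staged whole-string passes: mask via one regex
-- substitution with an explicit ASCII class, then lowercase, then strip underscores (idiomatic; measured faster in a timing run).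

-- ===== PORT A =====
-- per-character loop: append c.lower() for ASCII alnum / '-' / '_', else append '_'
def slugify_animation_stem_py (name : String) : String :=
  let out : List String := (PySem.Str.strip name).toList.foldl
    (fun acc c =>
      if (decide (c.toNat ≤ 127)) && (PySem.Chars.isalnum c || PySem.Chars.isIn [c] ['-', '_'])
      then acc ++ [String.ofList [PySem.Chars.lowerChar c]]
      else acc ++ ["_"]) []
  let s := PySem.Str.stripChars (PySem.Str.join "" out) "_"
  if s = "" then "unnamed" else s

-- ===== PORT B =====
-- the regex class [A-Za-z0-9_-] of Source B, as an explicit character test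
def pvInSlugClass (c : Char) : Bool :=
  (decide ('A'.toNat ≤ c.toNat) && decide (c.toNat ≤ 'Z'.toNat)) ||
  (decide ('a'.toNat ≤ c.toNat) && decide (c.toNat ≤ 'z'.toNat)) ||
  (decide ('0'.toNat ≤ c.toNat) && decide (c.toNat ≤ '9'.toNat)) ||
  c == '_' || c == '-'

-- _NON_SLUG.sub('_', s): a substitution on a single-character class replaces exactly the
-- characters outside the class by '_' — ported by hand (exact for this regex), then
-- .lower() and .strip('_') as whole-string passes, matching Source B's staging.
def slugify_animation_stem_py_alt (name : String) : String :=
  let masked : String := String.ofList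
    ((PySem.Str.strip name).toList.map (fun c => if pvInSlugClass c then c else '_'))
  let core := PySem.Str.stripChars (PySem.Str.lower masked) "_"
  if core = "" then "unnamed" else core

-- ===== PRECONDITION & SPEC =====
def Spec_slugify_animation_stem_py (name : String) (out : String) : Prop := out = slugify_animation_stem_py_alt name
instance (name : String) (out : String) : Decidable (Spec_slugify_animation_stem_py name out) := by unfold Spec_slugify_animation_stem_py; infer_instance

-- ===== CLAIM (what is proved, stated in full; the proofs are below) =====
def Claim_equal_slugify_animation_stem_py : Prop := ∀ (name : String), Dom_slugify_animation_stem_py name → Spec_slugify_animation_stem_py name (slugify_animation_stem_py name)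

-- ===== LEMMAS AND PROOFS =====
-- A's per-character branch as a function
def pvCharA (c : Char) : Char :=
  if (decide (c.toNat ≤ 127)) && (PySem.Chars.isalnum c || PySem.Chars.isIn [c] ['-', '_'])
  then PySem.Chars.lowerChar c else '_'

set_option maxRecDepth 10000 in
lemma pvChar_ascii : ∀ n < 128,
    PySem.Chars.lowerChar (if pvInSlugClass (Char.ofNat n) then Char.ofNat n else '_') =
      pvCharA (Char.ofNat n) := by
  decide

-- B's mask-then-lower computes A's per-character branch
lemma pvChar_eq (c : Char) :
    PySem.Chars.lowerChar (if pvInSlugClass c then c else '_') = pvCharA c := by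
  by_cases h : c.toNat < 128
  · have := pvChar_ascii c.toNat h
    rwa [Char.ofNat_toNat] at this
  · have hcls : pvInSlugClass c = false := by
      unfold pvInSlugClass
      have h4 : (c == '_') = false := by
        simp only [beq_eq_false_iff_ne, ne_eq]; intro hc; subst hc; simp at h
      have h5 : (c == '-') = false := by
        simp only [beq_eq_false_iff_ne, ne_eq]; intro hc; subst hc; simp at h
      simp [h4, h5]
      omega
    have hA : pvCharA c = '_' := by
      unfold pvCharA
      have hd : decide (c.toNat ≤ 127) = false := by simp; omega
      simp [hd]
    simp [hcls, hA]
    decide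
  
-- A's joined loop output equals the per-character image of A's branch
lemma pvJoin_eq (l : List Char) :
    (PySem.Str.join "" (l.foldl
      (fun acc c =>
        if (decide (c.toNat ≤ 127)) && (PySem.Chars.isalnum c || PySem.Chars.isIn [c] ['-', '_'])
        then acc ++ [String.ofList [PySem.Chars.lowerChar c]]
        else acc ++ ["_"]) [])).toList = l.map pvCharA := by
  have hfun : (fun (acc : List String) (c : Char) =>
      if (decide (c.toNat ≤ 127)) && (PySem.Chars.isalnum c || PySem.Chars.isIn [c] ['-', '_'])
      then acc ++ [String.ofList [PySem.Chars.lowerChar c]]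
      else acc ++ ["_"]) = fun acc c => acc ++ [String.ofList [pvCharA c]] := by
    funext acc c
    unfold pvCharA
    split <;> rfl
  rw [hfun, PySem.List.foldl_append_singleton_eq_map]
  simp only [PySem.Str.toList_join, List.map_map, List.nil_append]
  have : (l.map fun c => (String.ofList [pvCharA c]).toList) = l.map (fun c => [pvCharA c]) := by
    simp
  rw [Function.comp_def, this]
  have h2 : l.map (fun c => [pvCharA c]) = (l.map pvCharA).map (fun c => [c]) := by simp
  rw [show ("" : String).toList = [] from rfl, h2]
  exact PySem.Chars.join_nil_singletons (l.map pvCharA)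

-- ===== VERDICT (by name: the statement is the Claim_ definition above) =====
theorem slugify_animation_stem_py_spec : Claim_equal_slugify_animation_stem_py := by
  intro name _
  unfold Spec_slugify_animation_stem_py slugify_animation_stem_py slugify_animation_stem_py_alt
  have hstr : PySem.Str.join "" ((PySem.Str.strip name).toList.foldl
      (fun acc c =>
        if (decide (c.toNat ≤ 127)) && (PySem.Chars.isalnum c || PySem.Chars.isIn [c] ['-', '_'])
        then acc ++ [String.ofList [PySem.Chars.lowerChar c]]
        else acc ++ ["_"]) []) =
      PySem.Str.lower (String.ofList
        ((PySem.Str.strip name).toList.map (fun c => if pvInSlugClass c then c else '_'))) := by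
    apply String.toList_inj.mp
    rw [pvJoin_eq (PySem.Str.strip name).toList, PySem.Str.toList_lower]
    simp [PySem.Chars.lower, List.map_map, Function.comp_def, pvChar_eq]
  simp only [hstr]
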